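-- pv_equiv track=rewrite | github.com/mijahauan/time-manager | src/time_manager/timing/wwv_bcd_encoder.py | _to_bcd_12bit
-- ===== SOURCE A (Python) =====
-- def _to_bcd_12bit(value: int) -> list:
--     """Convert value (0-999) to 12-bit BCD [MSB...LSB]"""
--     hundreds = (value // 100) & 0x0F
--     tens = ((value % 100) // 10) & 0x0F
--     ones = value % 10
--
--     bcd = []
--     for i in range(4):
--         bcd.append((hundreds >> (3-i)) & 1)
--     for i in range(4):
--         bcd.append((tens >> (3-i)) & 1)
--     for i in range(4):
--         bcd.append((ones >> (3-i)) & 1)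
--     return bcd
-- ===== SOURCE B (Python) =====
-- # Precomputed nibble->bit-list table; digits obtained by a divmod chain
-- # (repeated divmod by 10) instead of independent //100, %100//10, %10.
-- _NIBBLE = [[(d >> 3) & 1, (d >> 2) & 1, (d >> 1) & 1, d & 1] for d in range(16)]
--
--
-- def _to_bcd_12bit(value: int) -> list:
--     """Convert value (0-999) to 12-bit BCD [MSB...LSB]"""
--     q, ones = divmod(value, 10)
--     hundreds, tens = divmod(q, 10)
--     return _NIBBLE[hundreds & 0x0F] + _NIBBLE[tens] + _NIBBLE[ones]
-- ===== Notes on version B (the rewrite author's own statement) =====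
-- stated objective: alternative
-- what changed: B extracts the digits by a chained divmod by ten instead of A's three independent floor-div/mod expressions, and replaces A's three bit-extraction loops with lookups in a precomputed nibble-to-bit-list table, concatenating the three looked-up rows.
import Mathlib
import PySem

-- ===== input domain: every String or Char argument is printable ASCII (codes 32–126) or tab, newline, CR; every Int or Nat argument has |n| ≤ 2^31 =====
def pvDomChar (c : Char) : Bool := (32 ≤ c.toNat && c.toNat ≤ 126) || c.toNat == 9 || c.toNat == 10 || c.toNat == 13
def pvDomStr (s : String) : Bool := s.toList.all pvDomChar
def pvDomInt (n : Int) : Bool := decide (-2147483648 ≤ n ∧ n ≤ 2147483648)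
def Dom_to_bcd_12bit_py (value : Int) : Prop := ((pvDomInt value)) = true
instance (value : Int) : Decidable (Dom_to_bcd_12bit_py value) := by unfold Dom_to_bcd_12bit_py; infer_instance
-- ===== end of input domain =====

-- B extracts the digits by a chained divmod instead of independent //100, %100//10, %10,
-- and emits the bits via a precomputed nibble→bits table instead of three shift loops (objective: alternative; same outputs).

-- ===== PORT A =====
-- Python's `x >> k` (k here is 0..3, nonnegative) is Lean's `x >>> k.toNat`, exact.
def to_bcd_12bit_py (value : Int) : List Int :=
  let hundreds := PySem.Int.band (PySem.Int.floordiv value 100) 0x0F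
  let tens := PySem.Int.band (PySem.Int.floordiv (PySem.Int.mod value 100) 10) 0x0F
  let ones := PySem.Int.mod value 10
  let bcd : List Int := []
  let bcd := (PySem.List.pyRange 0 4 1).foldl
    (fun acc i => acc ++ [PySem.Int.band (hundreds >>> (3 - i).toNat) 1]) bcd
  let bcd := (PySem.List.pyRange 0 4 1).foldl
    (fun acc i => acc ++ [PySem.Int.band (tens >>> (3 - i).toNat) 1]) bcd
  let bcd := (PySem.List.pyRange 0 4 1).foldl
    (fun acc i => acc ++ [PySem.Int.band (ones >>> (3 - i).toNat) 1]) bcd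
  bcd

-- ===== PORT B =====
-- the module-level table _NIBBLE (comprehension over range(16))
def pvNibbleTable : List (List Int) :=
  (PySem.List.pyRange 0 16 1).map
    (fun d : Int => [PySem.Int.band (d >>> 3) 1, PySem.Int.band (d >>> 2) 1,
               PySem.Int.band (d >>> 1) 1, PySem.Int.band d 1])

-- divmod with the nonzero literal divisor 10 never raises: `.getD (0,0)` is never taken.
-- Table indexing: the indices are provably in 0..15 / 0..9, so pyGetD with default [] is exact.
def to_bcd_12bit_py_alt (value : Int) : List Int :=
  let p1 := (PySem.Int.divmod? value 10).getD (0, 0)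
  let q := p1.1
  let ones := p1.2
  let p2 := (PySem.Int.divmod? q 10).getD (0, 0)
  let hundreds := p2.1
  let tens := p2.2
  PySem.List.pyGetD pvNibbleTable (PySem.Int.band hundreds 0x0F) []
    ++ PySem.List.pyGetD pvNibbleTable tens []
    ++ PySem.List.pyGetD pvNibbleTable ones []

-- ===== PRECONDITION & SPEC =====
def Spec_to_bcd_12bit_py (value : Int) (out : List Int) : Prop := out = to_bcd_12bit_py_alt value
instance (value : Int) (out : List Int) : Decidable (Spec_to_bcd_12bit_py value out) := by unfold Spec_to_bcd_12bit_py; infer_instance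

-- ===== CLAIM (what is proved, stated in full; the proofs are below) =====
def Claim_equal_to_bcd_12bit_py : Prop := ∀ (value : Int), Dom_to_bcd_12bit_py value → Spec_to_bcd_12bit_py value (to_bcd_12bit_py value)

-- ===== LEMMAS AND PROOFS =====

-- Python's `x & 0x0F` on any int is floor-mod 16.
theorem pv_band_fifteen (a : Int) : PySem.Int.band a 15 = PySem.Int.mod a 16 := by
  rw [PySem.Int.mod_eq_emod_of_pos (by norm_num : (0:Int) < 16)]
  unfold PySem.Int.band
  split_ifs with h1 h2 h3
  · rw [show Int.toNat 15 = 2 ^ 4 - 1 from rfl, Nat.and_two_pow_sub_one_eq_mod]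
    omega
  · norm_num at h2
  · rw [show Int.toNat 15 = 2 ^ 4 - 1 from rfl, Nat.and_comm, Nat.and_two_pow_sub_one_eq_mod]
    omega
  · norm_num at h3

-- For a digit d in 0..15, the table row at d is exactly the four MSB-first bits A computes.
theorem pv_nib (d : Int) (h0 : 0 ≤ d) (h1 : d < 16) :
    PySem.List.pyGetD pvNibbleTable d [] =
      [PySem.Int.band (d >>> (3:Int).toNat) 1, PySem.Int.band (d >>> (2:Int).toNat) 1,
       PySem.Int.band (d >>> (1:Int).toNat) 1, PySem.Int.band (d >>> (0:Int).toNat) 1] := by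
  interval_cases d <;> decide

theorem pv_main (value : Int) : to_bcd_12bit_py value = to_bcd_12bit_py_alt value := by
  have m10 : ∀ a : Int, PySem.Int.mod a 10 = a % 10 :=
    fun a => PySem.Int.mod_eq_emod_of_pos (by norm_num)
  have m100 : ∀ a : Int, PySem.Int.mod a 100 = a % 100 :=
    fun a => PySem.Int.mod_eq_emod_of_pos (by norm_num)
  have m16 : ∀ a : Int, PySem.Int.mod a 16 = a % 16 :=
    fun a => PySem.Int.mod_eq_emod_of_pos (by norm_num)
  have d10 : ∀ a : Int, PySem.Int.floordiv a 10 = a / 10 :=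
    fun a => PySem.Int.floordiv_eq_ediv_of_pos (by norm_num)
  have d100 : ∀ a : Int, PySem.Int.floordiv a 100 = a / 100 :=
    fun a => PySem.Int.floordiv_eq_ediv_of_pos (by norm_num)
  have dm : ∀ a : Int, (PySem.Int.divmod? a 10).getD (0,0) = (a / 10, a % 10) := by
    intro a
    unfold PySem.Int.divmod?
    simp only [if_neg (show (10:Int) ≠ 0 by norm_num), Option.getD_some]
    rw [Int.fdiv_eq_ediv, Int.fmod_eq_emod]
    norm_num
  unfold to_bcd_12bit_py to_bcd_12bit_py_alt
  simp only [dm]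
  rw [show PySem.List.pyRange 0 4 1 = [0,1,2,3] from by decide]
  simp only [List.foldl_cons, List.foldl_nil, List.nil_append, List.cons_append]
  -- B's digits as floor-div/mod expressions
  have hH : value / 10 / 10 = value / 100 := by omega
  have hT : value / 10 % 10 = value % 100 / 10 := by omega
  rw [hH, hT]
  -- bounds on the three digits
  have H1 : 0 ≤ PySem.Int.band (value / 100) 15 ∧ PySem.Int.band (value / 100) 15 < 16 := by
    rw [pv_band_fifteen, m16]; exact ⟨Int.emod_nonneg _ (by norm_num), Int.emod_lt_of_pos _ (by norm_num)⟩
  have H2 : 0 ≤ PySem.Int.band (value % 100 / 10) 15 ∧ PySem.Int.band (value % 100 / 10) 15 < 16 := by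
    rw [pv_band_fifteen, m16]; exact ⟨Int.emod_nonneg _ (by norm_num), Int.emod_lt_of_pos _ (by norm_num)⟩
  have H3 : 0 ≤ value % 10 ∧ value % 10 < 10 :=
    ⟨Int.emod_nonneg _ (by norm_num), Int.emod_lt_of_pos _ (by norm_num)⟩
  -- A's tens has the redundant & 0x0F; B's doesn't: identity on 0..9 via pv_band_fifteen
  have hTmask : PySem.Int.band (value % 100 / 10) 15 = value % 100 / 10 := by
    rw [pv_band_fifteen, m16]; omega
  rw [pv_nib _ H1.1 H1.2, pv_nib _ (hTmask ▸ H2.1) (hTmask ▸ H2.2), pv_nib _ H3.1 (by omega),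
      d100, m100, d10, m10, hTmask]
  simp only [Int.shiftRight_natCast_right, Int.shiftRight_eq_div_pow]
  norm_num [show Int.toNat 0 = 0 from rfl, show Int.toNat 1 = 1 from rfl,
    show Int.toNat 2 = 2 from rfl, show Int.toNat 3 = 3 from rfl]

-- ===== VERDICT (by name: the statement is the Claim_ definition above) =====
theorem to_bcd_12bit_py_spec : Claim_equal_to_bcd_12bit_py := by
  intro value _
  unfold Spec_to_bcd_12bit_py
  exact pv_main value
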